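-- pv_equiv track=rewrite | github.com/thirumal97/Insightdataproject | src/consumer_complaints.py | capture_result
-- ===== SOURCE A (Python) =====
-- from collections import Counter
--
-- def capture_result(prod_dict):
--     # new dict
--     new_dict = {}
--     # new list
--     new_list = []
--
--     #sort the product dictionary using keys
--     sort_keys = sorted(prod_dict.keys())
--
--     for key in sort_keys:
--
--         # we use counter to get the number of times that company got complaints
--         com = Counter(prod_dict[key])
--
--         # maximum complaints received for 'm' company
--         m = max(com)
--         j = com[m]
--
--         # how many times the complaint registered for the product in a year
--         k = len(prod_dict[key])
--
--         # how many distinct companies got the complaint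
--         t = (len(set(prod_dict[key])))
--
--         a = round(j/k*100)
--
--         new_dict[key]= [k,t,a]
--
--
--     # appending all the values into a list p
--     for key,val in new_dict.items():
--         new_list.append([key[0],key[1],str(val[0]),str(val[1]),str(val[2])])
--
--     #sort the p basing on the second values in the list i.e list[1] values
--     new_list.sort(key = lambda x:x[1])
--
--     return new_list
-- ===== SOURCE B (Python) =====
-- def capture_result(prod_dict):
--     # Sort-based re-implementation: per product sort the companies once; the max is the
--     # last element, its frequency is the trailing run length, and the distinct-company
--     # count is 1 + the number of run boundaries. No Counter, no set, no intermediate dict.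
--     rows = []
--     for key in sorted(prod_dict.keys()):
--         s = sorted(prod_dict[key])
--         k = len(s)
--         m = s[-1]
--         j = 0
--         for x in reversed(s):
--             if x != m:
--                 break
--             j += 1
--         t = 1 + sum(1 for x, y in zip(s, s[1:]) if x != y)
--         rows.append([key[0], key[1], str(k), str(t), str(round(j / k * 100))])
--     rows.sort(key=lambda x: x[1])
--     return rows
-- ===== Notes on version B (the rewrite author's own statement) =====
-- stated objective: alternative
-- what changed: A computes each product's statistics by hashing (Counter for frequencies, max() over the Counter's keys, a separate set() for distinct companies) and stages results in an intermediate dict; B instead sorts each company list once and reads everything off the sorted order in linear scans - the max is the last element, its frequency is the trailing run length, the distinct count is 1 + the number of run boundaries - appending output rows directly with no Counter, no set and no intermediate dict.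
import Mathlib
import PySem

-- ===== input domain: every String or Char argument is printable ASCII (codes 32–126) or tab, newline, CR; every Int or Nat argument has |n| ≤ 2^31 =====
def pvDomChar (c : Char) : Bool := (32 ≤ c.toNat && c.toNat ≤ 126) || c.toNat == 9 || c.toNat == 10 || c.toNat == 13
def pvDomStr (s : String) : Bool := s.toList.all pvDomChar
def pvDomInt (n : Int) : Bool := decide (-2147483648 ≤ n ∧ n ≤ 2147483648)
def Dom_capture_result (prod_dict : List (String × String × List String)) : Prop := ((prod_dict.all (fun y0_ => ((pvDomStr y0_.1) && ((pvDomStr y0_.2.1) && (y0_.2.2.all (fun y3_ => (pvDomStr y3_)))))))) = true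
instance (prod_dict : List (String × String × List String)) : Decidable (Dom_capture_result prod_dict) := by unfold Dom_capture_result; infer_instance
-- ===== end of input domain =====

-- B replaces A's hash-based Counter/max/set statistics by a sort-based scan: each company list is
-- sorted once, the max is its last element, the max's frequency is the trailing run length, and the
-- distinct count is 1 + the number of run boundaries; rows are built directly, no intermediate dict.

-- shared helper: the dict argument (assoc list → Python dict, last value wins, first position kept)
def pvDictOf (prod_dict : List (String × String × List String)) :
    PySem.Dict (String × String) (List String) :=
  PySem.Dict.ofList (prod_dict.map (fun p => ((p.1, p.2.1), p.2.2)))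

-- exact integer model of the IEEE-754 double expression round(j/k*100) (1 ≤ j ≤ k), used by both
-- ports for that one Python primitive expression: round-to-nearest-even to 53 bits for j/k, again
-- for ·*100, then Python's banker's round to an integer.
def pvScaled (p q : Nat) (t : Int) : Nat × Nat :=
  if 0 ≤ t then (p * 2 ^ t.toNat, q) else (p, q * 2 ^ (-t).toNat)

def pvHalfEven (m0 r D : Nat) : Nat :=
  if 2 * r > D ∨ (2 * r = D ∧ m0 % 2 = 1) then m0 + 1 else m0

def pvRnd53 (p q : Nat) : Nat × Int :=
  if p = 0 ∨ q = 0 then (0, 0) else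
  let t0 : Int := 53 + (PySem.Int.bitLength q) - (PySem.Int.bitLength p)
  let t : Int := if (pvScaled p q t0).1 / (pvScaled p q t0).2 ≥ 2 ^ 53 then t0 - 1 else t0
  let N := (pvScaled p q t).1
  let D := (pvScaled p q t).2
  (pvHalfEven (N / D) (N % D) D, t)

def pvRound100 (j k : Int) : Int :=
  let a := pvRnd53 j.toNat k.toNat
  let b := pvRnd53 (a.1 * 100) (2 ^ a.2.toNat)
  let D := 2 ^ b.2.toNat
  (pvHalfEven (b.1 / D) (b.1 % D) D : Nat)

-- ===== PORT A =====
def capture_result (prod_dict : List (String × String × List String)) : List (List String) :=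
  let d := pvDictOf prod_dict
  let sort_keys := PySem.List.sorted2 d.keys Prod.fst Prod.snd
  let new_dict := sort_keys.foldl (fun nd key =>
    let lst := d.getD key []
    let com := PySem.Dict.counter lst
    match PySem.List.max? com.keys (fun x => x) with
    | none => nd        -- max() of an empty Counter: ValueError, excluded by Pre_
    | some m =>
      let j : Int := com.getD m 0
      let k : Int := PySem.List.len lst
      let t : Int := PySem.Set.len (PySem.Set.ofList lst)
      nd.insert key [k, t, pvRound100 j k]) PySem.Dict.empty
  let new_list := new_dict.items.foldl (fun acc kv =>
    acc ++ [[kv.1.1, kv.1.2, PySem.Int.toStr (PySem.List.pyGetD kv.2 0 0),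
             PySem.Int.toStr (PySem.List.pyGetD kv.2 1 0),
             PySem.Int.toStr (PySem.List.pyGetD kv.2 2 0)]]) []
  PySem.List.sorted new_list (fun x => PySem.List.pyGetD x 1 "")

-- ===== PORT B =====
-- the 'for x in reversed(s): if x != m: break; j += 1' loop: leading run of m in the reversed list
def pvTakeEq (m : String) : List String → Nat
  | [] => 0
  | x :: xs => if x = m then pvTakeEq m xs + 1 else 0

def capture_result_alt (prod_dict : List (String × String × List String)) : List (List String) :=
  let d := pvDictOf prod_dict
  let rows := (PySem.List.sorted2 d.keys Prod.fst Prod.snd).foldl (fun rows key =>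
    let s := PySem.List.sorted (d.getD key []) (fun x => x)
    match PySem.List.pyGet? s (-1) with
    | none => rows      -- s[-1] of an empty list: IndexError, excluded by Pre_
    | some m =>
      let k : Int := PySem.List.len s
      let j : Int := (pvTakeEq m s.reverse : Nat)
      let t : Int := 1 + ((s.zip (PySem.List.slice s (some 1))).countP (fun p => !(p.1 == p.2)) : Nat)
      rows ++ [[key.1, key.2, PySem.Int.toStr k, PySem.Int.toStr t,
                PySem.Int.toStr (pvRound100 j k)]]) []
  PySem.List.sorted rows (fun x => PySem.List.pyGetD x 1 "")

-- ===== PRECONDITION & SPEC =====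
-- A raises ValueError (max of an empty Counter) exactly when some value list of the dict built from
-- prod_dict (last entry wins on a duplicate key) is empty; B raises IndexError there. Pre_ excludes
-- exactly those inputs.
def Pre_capture_result (prod_dict : List (String × String × List String)) : Prop :=
  ∀ kv ∈ (pvDictOf prod_dict).items, kv.2 ≠ []
instance (prod_dict : List (String × String × List String)) : Decidable (Pre_capture_result prod_dict) := by
  unfold Pre_capture_result; infer_instance

def pvWitness_capture_result : (List (String × String × List String)) :=
  [("Loan", "2019", ["Acme", "Zeta", "Acme"]), ("Card", "2019", ["Zeta"])]

def Spec_capture_result (prod_dict : List (String × String × List String)) (out : List (List String)) : Prop := out = capture_result_alt prod_dict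
instance (prod_dict : List (String × String × List String)) (out : List (List String)) : Decidable (Spec_capture_result prod_dict out) := by unfold Spec_capture_result; infer_instance

-- ===== CLAIM (what is proved, stated in full; the proofs are below) =====
def Claim_equal_capture_result : Prop := ∀ (prod_dict : List (String × String × List String)), Dom_capture_result prod_dict → Pre_capture_result prod_dict → Spec_capture_result prod_dict (capture_result prod_dict)

-- ===== LEMMAS AND PROOFS =====

@[simp] lemma pv_pyGetD3_0 (a b c d : Int) : PySem.List.pyGetD [a, b, c] 0 d = a := rfl
@[simp] lemma pv_pyGetD3_1 (a b c d : Int) : PySem.List.pyGetD [a, b, c] 1 d = b := rfl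
@[simp] lemma pv_pyGetD3_2 (a b c d : Int) : PySem.List.pyGetD [a, b, c] 2 d = c := rfl

-- the per-product statistics [k, t, a], phrased on the raw value list
def pvStatsOf (lst : List String) : List Int :=
  match lst with
  | [] => []
  | x0 :: rest =>
      [PySem.List.len (x0 :: rest), PySem.Set.len (PySem.Set.ofList (x0 :: rest)),
       pvRound100 ((List.count (rest.foldl max x0) (x0 :: rest) : Nat) : Int)
         (PySem.List.len (x0 :: rest))]

-- the output row for one dict item
def pvRowOf (kv : (String × String) × List String) : List String :=
  [kv.1.1, kv.1.2, PySem.Int.toStr (PySem.List.pyGetD (pvStatsOf kv.2) 0 0),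
   PySem.Int.toStr (PySem.List.pyGetD (pvStatsOf kv.2) 1 0),
   PySem.Int.toStr (PySem.List.pyGetD (pvStatsOf kv.2) 2 0)]

lemma pv_max_eq {x0 m : String} {rest : List String}
    (hm : m ∈ x0 :: rest) (hmax : ∀ y ∈ x0 :: rest, y ≤ m) : m = rest.foldl max x0 := by
  have h1 : rest.foldl max x0 ≤ m := by
    rcases PySem.List.foldl_max_mem rest x0 with hh | hh
    · exact le_of_eq_of_le hh (hmax x0 List.mem_cons_self)
    · exact hmax _ (List.mem_cons_of_mem _ hh)
  have h2 : m ≤ rest.foldl max x0 := by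
    rcases List.mem_cons.1 hm with hh | hh
    · exact le_of_eq_of_le hh (PySem.List.le_foldl_max rest x0).1
    · exact (PySem.List.le_foldl_max rest x0).2 m hh
  exact le_antisymm h2 h1

lemma pv_maxSet (x0 : String) (rest : List String) :
    PySem.List.max? (PySem.Set.ofList (x0 :: rest)) (fun y => y) = some (rest.foldl max x0) := by
  cases h : PySem.List.max? (PySem.Set.ofList (x0 :: rest)) (fun y => y) with
  | none =>
    rw [PySem.List.max?_eq_none_iff] at h
    simp [PySem.Set.ofList_cons] at h
  | some m =>
    have hm : m ∈ x0 :: rest := (PySem.Set.mem_ofList _ _).1 (PySem.List.max?_mem h)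
    have hmax : ∀ y ∈ x0 :: rest, y ≤ m :=
      fun y hy => PySem.List.max?_isMax h y ((PySem.Set.mem_ofList _ _).2 hy)
    rw [pv_max_eq hm hmax]

-- the reversed-scan loop counts exactly the occurrences of the maximum, on a descending list
lemma pv_takeEq_count (m : String) :
    ∀ (r : List String), r.Pairwise (fun a b => b ≤ a) → (∀ y ∈ r, y ≤ m) →
      pvTakeEq m r = r.count m := by
  intro r
  induction r with
  | nil => intro _ _; rfl
  | cons x xs ih =>
    intro hp hle
    rcases List.pairwise_cons.1 hp with ⟨hx, hxs⟩
    by_cases hxm : x = m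
    · have : pvTakeEq m xs = xs.count m :=
        ih hxs (fun y hy => le_of_le_of_eq (hx y hy) hxm)
      simp [pvTakeEq, hxm, this]
    · have hlt : x < m := lt_of_le_of_ne (hle x List.mem_cons_self) hxm
      have hc : xs.count m = 0 := by
        refine List.count_eq_zero.2 (fun hmem => ?_)
        exact absurd (lt_of_le_of_lt (hx m hmem) hlt) (lt_irrefl m)
      simp [pvTakeEq, hxm, hc]

-- 1 + (#run boundaries) = #distinct, on a sorted list
lemma pv_groups :
    ∀ (s : List String), s.Pairwise (· ≤ ·) → s ≠ [] →
      1 + (s.zip (s.drop 1)).countP (fun p => !(p.1 == p.2)) = s.toFinset.card := by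
  intro s
  induction s with
  | nil => intro _ h; exact absurd rfl h
  | cons x xs ih =>
    intro hp _
    rcases List.pairwise_cons.1 hp with ⟨hx, hxs⟩
    cases xs with
    | nil => simp
    | cons y ys =>
      have hih := ih hxs (by simp)
      by_cases hxy : x = y
      · have hxin : x ∈ y :: ys := by rw [hxy]; exact List.mem_cons_self
        rw [List.toFinset_cons, Finset.insert_eq_self.2 (List.mem_toFinset.2 hxin), ← hih]
        simp [hxy]
      · have hxout : x ∉ y :: ys := by
          intro hmem
          rcases List.pairwise_cons.1 hxs with ⟨hy, _⟩
          rcases List.mem_cons.1 hmem with h | h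
          · exact hxy h
          · exact hxy (le_antisymm (hx y List.mem_cons_self) (hy x h))
        rw [List.toFinset_cons,
          Finset.card_insert_of_notMem (fun h => hxout (List.mem_toFinset.1 h)), ← hih]
        simp [hxy]
        omega

lemma pv_distinct_len (lst : List String) :
    (PySem.Set.ofList lst).length = lst.toFinset.card := by
  rw [← List.toFinset_card_of_nodup (PySem.Set.nodup_ofList lst)]
  congr 1
  ext y
  simp [PySem.Set.mem_ofList]

lemma pv_lookup {pd : List (String × String × List String)}
    {kv : (String × String) × List String} (hkv : kv ∈ (pvDictOf pd).items) :
    (pvDictOf pd).getD kv.1 [] = kv.2 :=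
  PySem.Dict.getD_of_get?_eq_some _ _
    (PySem.Dict.get?_of_mem_items _ (by exact hkv) (PySem.Dict.nodup_keys_ofList _))

lemma pv_mem_keys {pd : List (String × String × List String)} {key : String × String}
    (hk : key ∈ (pvDictOf pd).keys) :
    ∃ v, ((key, v) ∈ (pvDictOf pd).items) := by
  rcases List.mem_map.1 hk with ⟨kv, hkv, hfst⟩
  exact ⟨kv.2, by rw [← hfst]; exact hkv⟩

-- B's per-product row, computed from the sorted list, is pvRowOf
lemma pv_rowB (key : String × String) (x0 : String) (rest : List String) :
    (let s := PySem.List.sorted (x0 :: rest) (fun x => x)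
     match PySem.List.pyGet? s (-1) with
     | none => ([] : List String)
     | some m =>
       [key.1, key.2, PySem.Int.toStr (PySem.List.len s),
        PySem.Int.toStr (1 + ((s.zip (PySem.List.slice s (some 1))).countP
            (fun p => !(p.1 == p.2)) : Nat)),
        PySem.Int.toStr (pvRound100 ((pvTakeEq m s.reverse : Nat)) (PySem.List.len s))])
      = pvRowOf (key, x0 :: rest) := by
  have hperm := PySem.List.sorted_perm (x0 :: rest) (fun x => x) false
  have hpair := PySem.List.sorted_pairwise (x0 :: rest) (fun x => x)
  set s := PySem.List.sorted (x0 :: rest) (fun x => x) with hs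
  have hsne : s ≠ [] := by
    rw [hs]
    intro h
    rw [PySem.List.sorted_eq_nil_iff] at h
    simp at h
  cases hr : s.reverse with
  | nil => exact absurd (List.reverse_eq_nil_iff.1 hr) hsne
  | cons m rt =>
    have hlast : PySem.List.pyGet? s (-1) = some m := by
      rw [PySem.List.pyGet?_neg_one, ← List.head?_reverse, hr]; rfl
    have hrp : (m :: rt).Pairwise (fun a b => b ≤ a) := by
      rw [← hr, List.pairwise_reverse]; exact hpair
    have hmemr : ∀ y, y ∈ m :: rt ↔ y ∈ x0 :: rest := by
      intro y; rw [← hr, List.mem_reverse]; exact hperm.mem_iff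
    have hle : ∀ y ∈ m :: rt, y ≤ m := by
      intro y hy
      rcases List.mem_cons.1 hy with h | h
      · exact le_of_eq h
      · exact (List.pairwise_cons.1 hrp).1 y h
    have hmM : m = rest.foldl max x0 :=
      pv_max_eq ((hmemr m).1 List.mem_cons_self)
        (fun y hy => hle y ((hmemr y).2 hy))
    have hcount : pvTakeEq m s.reverse = (x0 :: rest).count m := by
      rw [hr, pv_takeEq_count m _ hrp hle, ← hr]
      exact (s.reverse_perm.trans hperm).count_eq m
    have hlen : PySem.List.len s = PySem.List.len (x0 :: rest) := by
      simp [PySem.List.len_eq, hperm.length_eq]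
    have hgroups :
        (1 : Int) + ((s.zip (PySem.List.slice s (some 1))).countP (fun p => !(p.1 == p.2)) : Nat)
          = PySem.Set.len (PySem.Set.ofList (x0 :: rest)) := by
      rw [PySem.List.slice_from s (by norm_num : (0:Int) ≤ 1)]
      have := pv_groups s hpair hsne
      have hfs : s.toFinset = (x0 :: rest).toFinset := by
        ext y
        simp [List.mem_toFinset, hperm.mem_iff]
      have hsl : PySem.Set.len (PySem.Set.ofList (x0 :: rest))
          = ((PySem.Set.ofList (x0 :: rest)).length : Int) := by
        simp [PySem.Set.len]
      rw [hsl, pv_distinct_len, ← hfs, ← this]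
      push_cast
      ring
    simp only [hlast]
    rw [pvRowOf]
    simp only [pvStatsOf, pv_pyGetD3_0, pv_pyGetD3_1, pv_pyGetD3_2]
    rw [hcount, hlen, hmM, hgroups]

lemma pv_A_eq (pd : List (String × String × List String)) (hpre : Pre_capture_result pd) :
    capture_result pd
      = PySem.List.sorted
          ((PySem.List.sorted2 (pvDictOf pd).keys Prod.fst Prod.snd false).map
            (fun key => pvRowOf (key, (pvDictOf pd).getD key [])))
          (fun x => PySem.List.pyGetD x 1 "") false := by
  unfold capture_result
  dsimp only
  have hnd : (pvDictOf pd).keys.Nodup := PySem.Dict.nodup_keys_ofList _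
  have hperm := PySem.List.sorted2_perm (pvDictOf pd).keys Prod.fst Prod.snd false
  have h1 :
      List.foldl
        (fun nd key =>
          let lst := (pvDictOf pd).getD key []
          let com := PySem.Dict.counter lst
          match PySem.List.max? com.keys (fun x => x) with
          | none => nd
          | some m =>
            let j : Int := com.getD m 0
            let k : Int := PySem.List.len lst
            let t : Int := PySem.Set.len (PySem.Set.ofList lst)
            nd.insert key [k, t, pvRound100 j k])
        PySem.Dict.empty
        (PySem.List.sorted2 (pvDictOf pd).keys Prod.fst Prod.snd false)
      = List.foldl (fun nd key => nd.insert key (pvStatsOf ((pvDictOf pd).getD key [])))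
          PySem.Dict.empty
          (PySem.List.sorted2 (pvDictOf pd).keys Prod.fst Prod.snd false) := by
    refine PySem.List.foldl_congr_mem _ _ _ _ ?_
    intro nd key hk
    rcases pv_mem_keys (hperm.mem_iff.1 hk) with ⟨v, hkv⟩
    have hlst : (pvDictOf pd).getD key [] = v := pv_lookup hkv
    rcases v with _ | ⟨x0, rest⟩
    · exact absurd rfl (hpre _ hkv)
    · simp only [hlst, PySem.Dict.keys_counter, pv_maxSet, pvStatsOf,
        PySem.Dict.getD_counter]
  rw [h1]
  have h2 :
      (List.foldl (fun nd key => nd.insert key (pvStatsOf ((pvDictOf pd).getD key [])))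
          PySem.Dict.empty
          (PySem.List.sorted2 (pvDictOf pd).keys Prod.fst Prod.snd false)).items
      = (PySem.List.sorted2 (pvDictOf pd).keys Prod.fst Prod.snd false).map
          (fun key => (key, pvStatsOf ((pvDictOf pd).getD key []))) := by
    have := PySem.Dict.items_foldl_insert_fresh
      (PySem.List.sorted2 (pvDictOf pd).keys Prod.fst Prod.snd false) (fun a => a)
      (fun key => pvStatsOf ((pvDictOf pd).getD key [])) PySem.Dict.empty
      (fun a _ => PySem.Dict.contains_empty a) (by simpa using hperm.nodup_iff.2 hnd)
    simpa using this
  rw [h2, PySem.List.foldl_append_singleton_eq_map, List.nil_append, List.map_map]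
  rfl

lemma pv_B_eq (pd : List (String × String × List String)) (hpre : Pre_capture_result pd) :
    capture_result_alt pd
      = PySem.List.sorted
          ((PySem.List.sorted2 (pvDictOf pd).keys Prod.fst Prod.snd false).map
            (fun key => pvRowOf (key, (pvDictOf pd).getD key [])))
          (fun x => PySem.List.pyGetD x 1 "") false := by
  unfold capture_result_alt
  dsimp only
  have hperm := PySem.List.sorted2_perm (pvDictOf pd).keys Prod.fst Prod.snd false
  have h1 :
      List.foldl
        (fun rows key =>
          let s := PySem.List.sorted ((pvDictOf pd).getD key []) (fun x => x)
          match PySem.List.pyGet? s (-1) with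
          | none => rows
          | some m =>
            let k : Int := PySem.List.len s
            let j : Int := (pvTakeEq m s.reverse : Nat)
            let t : Int := 1 + ((s.zip (PySem.List.slice s (some 1))).countP
                (fun p => !(p.1 == p.2)) : Nat)
            rows ++ [[key.1, key.2, PySem.Int.toStr k, PySem.Int.toStr t,
                      PySem.Int.toStr (pvRound100 j k)]])
        []
        (PySem.List.sorted2 (pvDictOf pd).keys Prod.fst Prod.snd false)
      = List.foldl (fun rows key => rows ++ [pvRowOf (key, (pvDictOf pd).getD key [])]) []
          (PySem.List.sorted2 (pvDictOf pd).keys Prod.fst Prod.snd false) := by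
    refine PySem.List.foldl_congr_mem _ _ _ _ ?_
    intro rows key hk
    rcases pv_mem_keys (hperm.mem_iff.1 hk) with ⟨v, hkv⟩
    have hlst : (pvDictOf pd).getD key [] = v := pv_lookup hkv
    rcases v with _ | ⟨x0, rest⟩
    · exact absurd rfl (hpre _ hkv)
    · have hrow := pv_rowB key x0 rest
      dsimp only at hrow ⊢
      rw [hlst]
      cases hg : PySem.List.pyGet? (PySem.List.sorted (x0 :: rest) (fun x => x)) (-1) with
      | none =>
        rw [PySem.List.pyGet?_neg_one, List.getLast?_eq_none_iff,
          PySem.List.sorted_eq_nil_iff] at hg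
        simp at hg
      | some m =>
        rw [hg] at hrow
        rw [← hrow]
  rw [h1, PySem.List.foldl_append_singleton_eq_map, List.nil_append]

-- ===== VERDICT (by name: the statement is the Claim_ definition above) =====
theorem capture_result_spec : Claim_equal_capture_result := by
  intro pd _hdom hpre
  unfold Spec_capture_result
  rw [pv_A_eq pd hpre, pv_B_eq pd hpre]
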